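-- pv_equiv track=rewrite | github.com/posl/comment_recommendation | script/split_gen/4_time/zh/221_B/4.py | is_exchangeable
-- ===== SOURCE A (Python) =====
-- def is_exchangeable(s,t):
--     if s == t:
--         return True
--     else:
--         s = list(s)
--         t = list(t)
--         for i in range(len(s)-1):
--             s[i],s[i+1] = s[i+1],s[i]
--             if s == t:
--                 return True
--             else:
--                 s[i],s[i+1] = s[i+1],s[i]
--         return False
-- ===== SOURCE B (Python) =====
-- def is_exchangeable(s, t):
--     if s == t:
--         return True
--     if len(s) != len(t):
--         return False
--     n = len(s)
--     i = 0
--     while i < n and s[i] == t[i]: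
--         i += 1
--     # first difference is at i (it exists, since s != t and lengths are equal)
--     return (i + 1 < n and s[i] == t[i + 1] and s[i + 1] == t[i]
--             and s[i + 2:] == t[i + 2:])
-- ===== Notes on version B (the rewrite author's own statement) =====
-- stated objective: faster
-- what changed: A tries every adjacent swap and compares the whole list each time (O(n^2)); B does one left-to-right scan to the first mismatch and accepts iff the mismatch is an adjacent transposition with equal tails (O(n)).
import Mathlib
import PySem

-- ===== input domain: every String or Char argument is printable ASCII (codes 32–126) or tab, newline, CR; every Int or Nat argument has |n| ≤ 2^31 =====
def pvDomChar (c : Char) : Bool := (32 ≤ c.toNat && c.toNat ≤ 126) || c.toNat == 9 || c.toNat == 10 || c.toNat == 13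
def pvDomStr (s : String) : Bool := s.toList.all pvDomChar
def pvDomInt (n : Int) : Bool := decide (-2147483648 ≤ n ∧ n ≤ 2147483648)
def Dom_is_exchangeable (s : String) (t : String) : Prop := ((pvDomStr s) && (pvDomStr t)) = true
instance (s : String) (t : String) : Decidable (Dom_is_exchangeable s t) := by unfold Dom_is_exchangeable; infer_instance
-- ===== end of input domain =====

-- B replaces A's try-every-adjacent-swap-and-compare (quadratic) by a single scan to the
-- first mismatch that checks an adjacent transposition with equal tails (linear).


-- ===== PORT A =====
-- s[i],s[i+1] = s[i+1],s[i] on the mutable list (indices are in range since i < len-1)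
def pvSwapAdj (l : List Char) (i : Nat) : List Char :=
  (l.set i (l.getD (i+1) ' ')).set (i+1) (l.getD i ' ')

-- the for-loop over range(len(s)-1); the second swap restores s exactly, so the loop body
-- compares pvSwapAdj s i with t at each i while s itself stays the original list
def pvALoop (s : List Char) (t : List Char) : List Nat → Bool
  | [] => false
  | i :: rest =>
      if pvSwapAdj s i = t then true
      else pvALoop s t rest

def is_exchangeable (s : String) (t : String) : Bool :=
  if s = t then true
  else pvALoop s.toList t.toList (List.range (s.toList.length - 1))

-- ===== PORT B =====
-- the while-loop advancing past equal prefixes, then the final adjacent-swap check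
-- (s[i]==t[i+1] and s[i+1]==t[i] and s[i+2:]==t[i+2:]); i+1<n is the cons-cons pattern
def pvAltGo : List Char → List Char → Bool
  | a :: s', c :: t' =>
      if a = c then pvAltGo s' t'
      else
        match s', t' with
        | b :: s'', d :: t'' => decide (a = d) && decide (b = c) && decide (s'' = t'')
        | _, _ => false
  | _, _ => false

def is_exchangeable_alt (s : String) (t : String) : Bool :=
  if s = t then true
  else if s.toList.length ≠ t.toList.length then false
  else pvAltGo s.toList t.toList

-- ===== PRECONDITION & SPEC =====
def Spec_is_exchangeable (s : String) (t : String) (out : Bool) : Prop := out = is_exchangeable_alt s t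
instance (s : String) (t : String) (out : Bool) : Decidable (Spec_is_exchangeable s t out) := by unfold Spec_is_exchangeable; infer_instance

-- ===== CLAIM (what is proved, stated in full; the proofs are below) =====
def Claim_equal_is_exchangeable : Prop := ∀ (s : String) (t : String), Dom_is_exchangeable s t → Spec_is_exchangeable s t (is_exchangeable s t)

-- ===== LEMMAS AND PROOFS =====

theorem pvSwapAdj_length (l : List Char) (i : Nat) : (pvSwapAdj l i).length = l.length := by
  simp [pvSwapAdj]

theorem pvSwapAdj_succ (a : Char) (l : List Char) (i : Nat) :
    pvSwapAdj (a :: l) (i+1) = a :: pvSwapAdj l i := by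
  simp [pvSwapAdj]

theorem pvSwapAdj_zero (a b : Char) (l : List Char) :
    pvSwapAdj (a :: b :: l) 0 = b :: a :: l := by
  simp [pvSwapAdj]

theorem pvALoop_true_iff (s t : List Char) (is : List Nat) :
    pvALoop s t is = true ↔ ∃ i ∈ is, pvSwapAdj s i = t := by
  induction is with
  | nil => simp [pvALoop]
  | cons i rest ih =>
      simp only [pvALoop]
      split_ifs with h
      · simp [h]
      · simp [ih, h]

theorem pvAltGo_true_iff (s t : List Char) (hne : s ≠ t) :
    pvAltGo s t = true ↔ ∃ i, i + 1 < s.length ∧ pvSwapAdj s i = t := by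
  induction s generalizing t with
  | nil =>
      simp only [pvAltGo]
      constructor
      · intro h; cases t <;> simp_all
      · rintro ⟨i, hi, _⟩; simp at hi
  | cons a s' ih =>
      cases t with
      | nil =>
          constructor
          · intro h; simp [pvAltGo] at h
          · rintro ⟨i, hi, hsw⟩
            have := pvSwapAdj_length (a :: s') i
            rw [hsw] at this; simp at this
      | cons c t' =>
          by_cases hac : a = c
          · subst hac
            have hne' : s' ≠ t' := by intro h; exact hne (by rw [h])
            have step : pvAltGo (a :: s') (a :: t') = pvAltGo s' t' := by
              simp [pvAltGo]
            rw [step, ih t' hne']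
            constructor
            · rintro ⟨i, hi, hsw⟩
              exact ⟨i + 1, by simpa using Nat.succ_lt_succ hi,
                     by rw [pvSwapAdj_succ, hsw]⟩
            · rintro ⟨i, hi, hsw⟩
              cases i with
              | zero =>
                  -- swapping at 0 would need s' = b::s'' with b::a::s'' = a::t'
                  cases s' with
                  | nil => simp at hi
                  | cons b s'' =>
                      rw [pvSwapAdj_zero] at hsw
                      obtain ⟨hb, rfl⟩ : b = a ∧ a :: s'' = t' := by
                        injection hsw with h1 h2; exact ⟨h1, h2⟩
                      subst hb
                      exact absurd rfl hne
              | succ j =>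
                  rw [pvSwapAdj_succ] at hsw
                  injection hsw with _ h2
                  exact ⟨j, by simpa using Nat.lt_of_succ_lt_succ hi, h2⟩
          · cases s' with
            | nil =>
                constructor
                · intro h; simp [pvAltGo, hac] at h
                · rintro ⟨i, hi, _⟩; simp at hi
            | cons b s'' =>
                cases t' with
                | nil =>
                    constructor
                    · intro h; simp [pvAltGo, hac] at h
                    · rintro ⟨i, hi, hsw⟩
                      have := pvSwapAdj_length (a :: b :: s'') i
                      rw [hsw] at this; simp at this
                | cons d t'' =>
                    have step : pvAltGo (a :: b :: s'') (c :: d :: t'') =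
                        (decide (a = d) && decide (b = c) && decide (s'' = t'')) := by
                      simp [pvAltGo, hac]
                    rw [step]
                    constructor
                    · intro h
                      simp only [Bool.and_eq_true, decide_eq_true_eq] at h
                      obtain ⟨⟨had, hbc⟩, hst⟩ := h
                      exact ⟨0, by simp, by rw [pvSwapAdj_zero, had, ← hbc, hst]⟩
                    · rintro ⟨i, hi, hsw⟩
                      cases i with
                      | zero =>
                          rw [pvSwapAdj_zero] at hsw
                          injection hsw with h1 h2
                          injection h2 with h3 h4
                          simp [h1, h3, h4]
                      | succ j =>
                          rw [pvSwapAdj_succ] at hsw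
                          injection hsw with h1 _
                          exact absurd h1 hac

theorem pvString_eq_iff (s t : String) : s = t ↔ s.toList = t.toList := by
  constructor
  · intro h; rw [h]
  · intro h; exact String.toList_inj.mp h

theorem is_exchangeable_eq (s t : String) : is_exchangeable s t = is_exchangeable_alt s t := by
  unfold is_exchangeable is_exchangeable_alt
  by_cases hst : s = t
  · simp [hst]
  · simp only [hst, if_false]
    have hlist : s.toList ≠ t.toList := fun h => hst ((pvString_eq_iff s t).mpr h)
    by_cases hlen : s.toList.length = t.toList.length
    · simp only [hlen, ne_eq, not_true_eq_false, if_false]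
      rw [Bool.eq_iff_iff, pvALoop_true_iff, pvAltGo_true_iff _ _ hlist]
      constructor
      · rintro ⟨i, hi, hsw⟩
        have := List.mem_range.mp hi
        exact ⟨i, by omega, hsw⟩
      · rintro ⟨i, hi, hsw⟩
        exact ⟨i, List.mem_range.mpr (by omega), hsw⟩
    · simp only [ne_eq, hlen, not_false_eq_true, if_true]
      rw [Bool.eq_false_iff, ne_eq, pvALoop_true_iff]
      rintro ⟨i, _, hsw⟩
      exact hlen (by rw [← hsw, pvSwapAdj_length])

-- ===== VERDICT (by name: the statement is the Claim_ definition above) =====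
theorem is_exchangeable_spec : Claim_equal_is_exchangeable := by
  intro s t _
  unfold Spec_is_exchangeable
  exact is_exchangeable_eq s t
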